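-- pv_equiv track=rewrite | github.com/cyberosa/hackerrank_challenges | poisonous1.py | update_queues
-- ===== SOURCE A (Python) =====
-- def update_queues(p):
--     dying = False
--     # traverse all plants in p
--     # start from the end of the array
--     m = len(p)
--     last = p[m-1] # last element of the array
--     m = m-2 # next position
--     new_p = []
--     while m >=0:
--         if last <= p[m]:
--             new_p.append(last)
--         else: # last > p[m] --> die
--             dying = True
--         last = p[m]
--         m -= 1
--     # always add the first element
--     new_p.append(p[0])
--     # plants who survided in new_p
--     return new_p[::-1], dying
-- ===== SOURCE B (Python) =====
-- def update_queues(p):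
--     # Segment p into maximal non-increasing runs: a plant dies exactly when it
--     # starts a new run, so survivors = first run + tails of the later runs and
--     # dying = (there is more than one run).
--     runs = []
--     cur = [p[0]]
--     for x in p[1:]:
--         if x <= cur[-1]:
--             cur.append(x)
--         else:
--             runs.append(cur)
--             cur = [x]
--     runs.append(cur)
--     survivors = runs[0][:]
--     for r in runs[1:]:
--         survivors.extend(r[1:])
--     return survivors, len(runs) > 1
-- ===== Notes on version B (the rewrite author's own statement) =====
-- stated objective: alternative
-- what changed: Instead of one backward index loop flagging each comparison, B segments p into maximal non-increasing runs as an intermediate structure and derives both outputs from it: survivors = first run plus the tails of later runs, dying = more than one run.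
import Mathlib
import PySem

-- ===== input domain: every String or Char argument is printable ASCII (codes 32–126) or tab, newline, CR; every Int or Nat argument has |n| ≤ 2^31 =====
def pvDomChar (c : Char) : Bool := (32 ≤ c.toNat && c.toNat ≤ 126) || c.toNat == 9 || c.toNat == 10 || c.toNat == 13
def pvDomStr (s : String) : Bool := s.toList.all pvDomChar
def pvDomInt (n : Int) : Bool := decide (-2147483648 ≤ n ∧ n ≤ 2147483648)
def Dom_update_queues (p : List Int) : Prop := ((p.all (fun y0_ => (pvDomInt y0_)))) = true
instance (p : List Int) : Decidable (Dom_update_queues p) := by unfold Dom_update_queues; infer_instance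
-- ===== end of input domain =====

-- B replaces A's backward index loop by segmenting p into maximal non-increasing runs
-- and reading both outputs off the run structure (alternative decomposition, same O(n) cost).

-- ===== PORT A =====
-- while loop of A: fuel n+1 means current m = n; state (last, new_p, dying)
def update_queues_loop (p : List Int) : Nat → Int → List Int → Bool → List Int × Bool
  | 0, _last, new_p, dying => (new_p, dying)
  | n+1, last, new_p, dying =>
    let pm := PySem.List.pyGetD p (n : Int) 0   -- p[m]; in range for every loop iteration under Pre_
    if last ≤ pm then update_queues_loop p n pm (new_p ++ [last]) dying
    else update_queues_loop p n pm new_p true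

def update_queues (p : List Int) : List Int × Bool :=
  match PySem.List.pyGet? p ((p.length : Int) - 1) with
  | none => ([], false)   -- IndexError on empty p (excluded by Pre_)
  | some last =>
    let r := update_queues_loop p (p.length - 1) last [] false
    let new_p := r.1 ++ [PySem.List.pyGetD p 0 0]   -- append the first element
    (new_p.reverse, r.2)    -- new_p[::-1] is reverse

-- ===== PORT B =====
-- loop body of B: state (runs, cur); cur[-1] via pyGetD s.2 (-1)
def pvStep (s : List (List Int) × List Int) (x : Int) : List (List Int) × List Int :=
  if x ≤ PySem.List.pyGetD s.2 (-1) 0 then (s.1, s.2 ++ [x])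
  else (s.1 ++ [s.2], [x])

def update_queues_alt (p : List Int) : List Int × Bool :=
  let s := (p.drop 1).foldl pvStep ([], [PySem.List.pyGetD p 0 0])  -- first element; IndexError on empty p (excluded by Pre_)
  let runs := s.1 ++ [s.2]
  let survivors := runs.headD [] ++   -- runs[0][:]; runs is never empty
    (runs.drop 1).foldl (fun acc r => acc ++ r.drop 1) []   -- for r in runs[1:]: survivors.extend(r[1:])
  (survivors, decide (runs.length > 1))

-- ===== PRECONDITION & SPEC =====
-- both programs index the first element (and A also the last), raising IndexError on the empty list
def Pre_update_queues (p : List Int) : Prop := p ≠ []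
instance (p : List Int) : Decidable (Pre_update_queues p) := by unfold Pre_update_queues; infer_instance
def pvWitness_update_queues : List Int := ([3, 1, 2, 5, 4])
def Spec_update_queues (p : List Int) (out : List Int × Bool) : Prop := out = update_queues_alt p
instance (p : List Int) (out : List Int × Bool) : Decidable (Spec_update_queues p out) := by unfold Spec_update_queues; infer_instance

-- ===== CLAIM (what is proved, stated in full; the proofs are below) =====
def Claim_equal_update_queues : Prop := ∀ (p : List Int), Dom_update_queues p → Pre_update_queues p → Spec_update_queues p (update_queues p)

-- ===== LEMMAS AND PROOFS =====

-- survivors kept by A's loop up to fuel n, in increasing index order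
def pvKeep (p : List Int) (n : Nat) : List Int :=
  (List.range n).filterMap (fun i => if p.getD (i+1) 0 ≤ p.getD i 0 then some (p.getD (i+1) 0) else none)

def pvUp (p : List Int) (n : Nat) : Bool :=
  (List.range n).any (fun i => decide (p.getD i 0 < p.getD (i+1) 0))

-- structural versions of the same data, for B's side
def pvKeepS (prev : Int) : List Int → List Int
  | [] => []
  | x :: xs => (if x ≤ prev then [x] else []) ++ pvKeepS x xs

def pvUpS (prev : Int) : List Int → Bool
  | [] => false
  | x :: xs => decide (prev < x) || pvUpS x xs

theorem pv_loop_spec (p : List Int) (n : Nat) (h : n < p.length) (acc : List Int) (dy : Bool) :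
    update_queues_loop p n (p.getD n 0) acc dy = (acc ++ (pvKeep p n).reverse, dy || pvUp p n) := by
  induction n generalizing acc dy with
  | zero => simp [update_queues_loop, pvKeep, pvUp]
  | succ n ih =>
    have hn : n < p.length := Nat.lt_of_succ_lt h
    have hpm : PySem.List.pyGetD p (n : Int) 0 = p.getD n 0 := by
      simp [PySem.List.pyGetD_natCast]
    by_cases hc : p.getD (n+1) 0 ≤ p.getD n 0
    · have hc' : p[n+1]?.getD 0 ≤ p[n]?.getD 0 := by
        simpa [List.getD_eq_getElem?_getD] using hc
      simp only [update_queues_loop, hpm, if_pos hc, ih hn]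
      simp only [Prod.mk.injEq]
      refine ⟨?_, ?_⟩
      · simp [pvKeep, List.range_succ, hc']
      · simp [pvUp, List.range_succ, not_lt.mpr hc']
    · have hc' : p[n]?.getD 0 < p[n+1]?.getD 0 := by
        simpa [List.getD_eq_getElem?_getD] using lt_of_not_ge hc
      simp only [update_queues_loop, hpm, if_neg hc, ih hn]
      simp only [Prod.mk.injEq]
      refine ⟨?_, ?_⟩
      · simp [pvKeep, List.range_succ, not_le.mpr hc']
      · simp [pvUp, List.range_succ, hc']

theorem pvKeep_cons (xs : List Int) : ∀ (x : Int), pvKeep (x :: xs) xs.length = pvKeepS x xs := by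
  induction xs with
  | nil => intro x; simp [pvKeep, pvKeepS]
  | cons y ys ih =>
    intro x
    have h : pvKeep (x :: y :: ys) (ys.length + 1)
        = (if y ≤ x then [y] else []) ++ pvKeep (y :: ys) ys.length := by
      simp only [pvKeep, List.range_succ_eq_map, List.filterMap_cons, List.filterMap_map]
      by_cases hyx : y ≤ x <;> simp [hyx]
    simpa [pvKeepS, ih] using h

theorem pvUp_cons (xs : List Int) : ∀ (x : Int), pvUp (x :: xs) xs.length = pvUpS x xs := by
  induction xs with
  | nil => intro x; simp [pvUp, pvUpS]
  | cons y ys ih =>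
    intro x
    have h : pvUp (x :: y :: ys) (ys.length + 1)
        = (decide (x < y) || pvUp (y :: ys) ys.length) := by
      simp only [pvUp, List.range_succ_eq_map, List.any_cons, List.any_map,
        Function.comp_def]
      simp
    simpa [pvUpS, ih] using h

-- survivors and dying as read off a fold state (runs, cur)
def pvOutF (s : List (List Int) × List Int) : List Int :=
  match s.1 with
  | [] => s.2
  | r :: rs => r ++ ((rs ++ [s.2]).map (fun l => l.drop 1)).flatten

def pvDyF (s : List (List Int) × List Int) : Bool := !s.1.isEmpty

theorem pv_fold_spec (xs : List Int) : ∀ (runs : List (List Int)) (cur : List Int) (h : cur ≠ []),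
    pvOutF ((xs.foldl pvStep (runs, cur))) = pvOutF (runs, cur) ++ pvKeepS (cur.getLast h) xs
    ∧ pvDyF ((xs.foldl pvStep (runs, cur))) = (pvDyF (runs, cur) || pvUpS (cur.getLast h) xs) := by
  induction xs with
  | nil => intro runs cur h; simp [pvKeepS, pvUpS]
  | cons x xs ih =>
    intro runs cur h
    have hlast : PySem.List.pyGetD cur (-1) 0 = cur.getLast h := PySem.List.pyGetD_neg_one cur 0 h
    by_cases hc : x ≤ cur.getLast h
    · have hstep : pvStep (runs, cur) x = (runs, cur ++ [x]) := by
        simp [pvStep, hlast, hc]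
      have hne : cur ++ [x] ≠ [] := by simp
      have hlast2 : (cur ++ [x]).getLast hne = x := by simp
      obtain ⟨h1, h2⟩ := ih runs (cur ++ [x]) hne
      rw [hlast2] at h1 h2
      have hdrop : (cur ++ [x]).tail = cur.tail ++ [x] := by
        cases cur with
        | nil => exact absurd rfl h
        | cons c cs => simp
      have hout : pvOutF (runs, cur ++ [x]) = pvOutF (runs, cur) ++ [x] := by
        cases runs with
        | nil => simp [pvOutF]
        | cons r rs => simp [pvOutF, hdrop]
      have hdy : pvDyF (runs, cur ++ [x]) = pvDyF (runs, cur) := rfl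
      constructor
      · simp only [List.foldl_cons, hstep, h1, hout, pvKeepS, if_pos hc, List.append_assoc,
          List.singleton_append]
      · rw [List.foldl_cons, hstep, h2, hdy, pvUpS]
        simp [not_lt.mpr hc]
    · have hstep : pvStep (runs, cur) x = (runs ++ [cur], [x]) := by
        simp [pvStep, hlast, hc]
      have hne : ([x] : List Int) ≠ [] := by simp
      have hlast2 : ([x] : List Int).getLast hne = x := by simp
      obtain ⟨h1, h2⟩ := ih (runs ++ [cur]) [x] hne
      rw [hlast2] at h1 h2
      have hout : pvOutF (runs ++ [cur], [x]) = pvOutF (runs, cur) := by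
        cases runs with
        | nil => simp [pvOutF]
        | cons r rs => simp [pvOutF]
      have hdy : pvDyF (runs ++ [cur], [x]) = true := by simp [pvDyF]
      have hup : decide (cur.getLast h < x) = true := by simp [lt_of_not_ge hc]
      constructor
      · simp only [List.foldl_cons, hstep, h1, hout, pvKeepS, if_neg hc, List.nil_append]
      · simp only [List.foldl_cons, hstep, h2, hdy, pvUpS, hup, Bool.true_or]
        cases pvDyF (runs, cur) <;> simp

theorem pv_assemble (t : List (List Int) × List Int) :
    ((t.1 ++ [t.2]).headD [] ++ ((t.1 ++ [t.2]).drop 1).foldl (fun acc r => acc ++ r.drop 1) [],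
      decide ((t.1 ++ [t.2]).length > 1)) = (pvOutF t, pvDyF t) := by
  obtain ⟨t1, t2⟩ := t
  cases t1 <;> simp [pvOutF, pvDyF]

theorem pv_alt_spec (x : Int) (xs : List Int) :
    update_queues_alt (x :: xs) = (x :: pvKeepS x xs, pvUpS x xs) := by
  have hne : ([x] : List Int) ≠ [] := by simp
  obtain ⟨h1, h2⟩ := pv_fold_spec xs [] [x] hne
  simp only [List.getLast_singleton] at h1 h2
  have hinit1 : pvOutF (([] : List (List Int)), [x]) = [x] := rfl
  have hinit2 : pvDyF (([] : List (List Int)), [x]) = false := rfl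
  rw [hinit1] at h1; rw [hinit2] at h2
  unfold update_queues_alt
  simp only [PySem.List.pyGetD_zero, List.getD_cons_zero]
  rw [pv_assemble]
  simp only [List.drop_one, List.tail_cons]
  rw [h1, h2]
  simp

-- ===== VERDICT (by name: the statement is the Claim_ definition above) =====
theorem update_queues_spec : Claim_equal_update_queues := by
  intro p _hd hp
  obtain ⟨x, xs, rfl⟩ : ∃ x xs, p = x :: xs := by
    cases p with
    | nil => exact absurd rfl hp
    | cons a b => exact ⟨a, b, rfl⟩
  unfold Spec_update_queues
  rw [pv_alt_spec]
  unfold update_queues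
  have hlen : (x :: xs).length = xs.length + 1 := by simp
  have hlt : xs.length < (x :: xs).length := by simp
  have hget : PySem.List.pyGet? (x :: xs) (((x :: xs).length : Int) - 1) = some ((x :: xs).getD xs.length 0) := by
    have hcast : (((x :: xs).length : Int) - 1) = ((xs.length : Nat) : Int) := by
      simp [hlen]
    rw [hcast, PySem.List.pyGet?_natCast, List.getElem?_eq_getElem hlt, List.getD_eq_getElem _ 0 hlt]
  rw [hget]
  have hfuel : (x :: xs).length - 1 = xs.length := by simp
  dsimp only
  rw [hfuel, pv_loop_spec (x :: xs) xs.length hlt [] false]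
  simp [pvKeep_cons, pvUp_cons, PySem.List.pyGetD]
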